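-- pv_equiv track=rewrite | github.com/zhengzhent/MegaCQA | construction/QA/radar.py | get_lab_under_result
-- ===== SOURCE A (Python) =====
-- def get_index_less_than(data, row_index, x):
--     if row_index < 0 or row_index >= len(data):
--         raise ValueError("行索引超出范围")
--     indices = [i for i, v in enumerate(data[row_index]) if v < x]
--     return indices if indices else "None"
--
-- def get_lab_under_result(data, row_index, dimensions, threshold=50):
--     indices = get_index_less_than(data, row_index, threshold)
--     if indices == "None":
--         return f"None is under {threshold}"
--     else:
--         result_list = []
--         for idx in indices:
--             result_list.append(f"{{{dimensions[idx]}}} is {{{data[row_index][idx]}}}")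
--         return ", ".join(result_list)
-- ===== SOURCE B (Python) =====
-- def get_lab_under_result(data, row_index, dimensions, threshold=50):
--     if row_index < 0 or row_index >= len(data):
--         raise ValueError("行索引超出范围")
--     row = data[row_index]
--
--     def go(i):
--         # joined string of the formatted entries from index i onward, or None if there are none
--         if i == len(row):
--             return None
--         rest = go(i + 1)
--         v = row[i]
--         if v < threshold:
--             piece = f"{{{dimensions[i]}}} is {{{v}}}"
--             return piece if rest is None else piece + ", " + rest
--         return rest
--
--     s = go(0)
--     return f"None is under {threshold}" if s is None else s
-- ===== Notes on version B (the rewrite author's own statement) =====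
-- stated objective: alternative
-- what changed: Replaces A's staged pipeline (collect matching indices, 'None' string sentinel, re-index and format, ', '.join) by a recursive back-to-front construction that builds the final joined string directly with an Option-style accumulator, with no intermediate list and no join call.
import Mathlib
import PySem

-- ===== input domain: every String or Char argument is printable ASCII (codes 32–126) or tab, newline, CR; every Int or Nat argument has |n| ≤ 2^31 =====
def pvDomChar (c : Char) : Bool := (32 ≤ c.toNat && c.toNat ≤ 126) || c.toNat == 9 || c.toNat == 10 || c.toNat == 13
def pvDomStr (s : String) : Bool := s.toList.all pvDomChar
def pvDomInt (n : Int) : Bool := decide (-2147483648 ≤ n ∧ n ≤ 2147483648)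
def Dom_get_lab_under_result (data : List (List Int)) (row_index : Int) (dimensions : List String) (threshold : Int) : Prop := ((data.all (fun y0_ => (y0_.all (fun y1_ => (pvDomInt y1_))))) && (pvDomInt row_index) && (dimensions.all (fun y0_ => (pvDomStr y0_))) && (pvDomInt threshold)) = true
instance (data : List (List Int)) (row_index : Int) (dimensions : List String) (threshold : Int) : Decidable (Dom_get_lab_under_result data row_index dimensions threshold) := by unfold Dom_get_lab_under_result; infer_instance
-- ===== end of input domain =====

-- ===== PORT A =====
-- Header: B replaces A's staged pipeline (index list + "None" sentinel + re-index/format +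
-- join) by a recursive back-to-front construction of the joined string with an Option
-- accumulator (objective: alternative); same return value on Pre_.
-- A's helper returns either an index list or the string "None"; modelled with Sum, and
-- Option for the ValueError (none = raise, excluded by Pre_).
def get_index_less_than (data : List (List Int)) (row_index : Int) (x : Int) :
    Option (List Int ⊕ String) :=
  if row_index < 0 ∨ (data.length : Int) ≤ row_index then none  -- raise ValueError
  else
    let indices := (PySem.List.enumerate ((PySem.List.pyGet? data row_index).getD [])).filterMap
      (fun p => if p.2 < x then some p.1 else none)
    some (if indices.isEmpty then Sum.inr "None" else Sum.inl indices)

def get_lab_under_result (data : List (List Int)) (row_index : Int) (dimensions : List String) (threshold : Int) : String :=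
  match get_index_less_than data row_index threshold with
  | none => ""  -- A raises ValueError here; excluded by Pre_
  | some (Sum.inr _) => "None is under " ++ PySem.Int.toStr threshold
  | some (Sum.inl indices) =>
      let row := (PySem.List.pyGet? data row_index).getD []
      -- dimensions[idx]: pyGet? with .getD; the IndexError case is excluded by Pre_
      PySem.Str.join ", " (indices.map (fun idx =>
        "{" ++ (PySem.List.pyGet? dimensions idx).getD "" ++ "} is {" ++
        PySem.Int.toStr ((PySem.List.pyGet? row idx).getD 0) ++ "}"))

-- ===== PORT B =====
-- B's nested recursive go(i): recursion over the remaining row, carrying the index i;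
-- returns the joined string of formatted matches from i onward, none if there are none.
def goB (dimensions : List String) (threshold : Int) : List Int → Int → Option String
  | [], _ => none
  | v :: rest, i =>
    let r := goB dimensions threshold rest (i + 1)
    if v < threshold then
      -- dimensions[i]: pyGet? with .getD; the IndexError case is excluded by Pre_
      let piece := "{" ++ (PySem.List.pyGet? dimensions i).getD "" ++ "} is {" ++
                   PySem.Int.toStr v ++ "}"
      some (match r with | none => piece | some s => piece ++ ", " ++ s)
    else r

def get_lab_under_result_alt (data : List (List Int)) (row_index : Int) (dimensions : List String) (threshold : Int) : String :=
  if row_index < 0 ∨ (data.length : Int) ≤ row_index then ""  -- raise ValueError; excluded by Pre_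
  else
    match goB dimensions threshold ((PySem.List.pyGet? data row_index).getD []) 0 with
    | none => "None is under " ++ PySem.Int.toStr threshold
    | some s => s

-- ===== PRECONDITION & SPEC =====
-- Pre_ excludes exactly the inputs where the Python A raises: row_index out of range
-- (ValueError) and rows where some value below threshold sits at an index with no
-- corresponding entry in dimensions (IndexError on dimensions[idx]).
def Pre_get_lab_under_result (data : List (List Int)) (row_index : Int) (dimensions : List String) (threshold : Int) : Prop :=
  0 ≤ row_index ∧ row_index < (data.length : Int) ∧
  ∀ p ∈ PySem.List.enumerate ((PySem.List.pyGet? data row_index).getD []),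
    p.2 < threshold → p.1 < (dimensions.length : Int)
instance (data : List (List Int)) (row_index : Int) (dimensions : List String) (threshold : Int) : Decidable (Pre_get_lab_under_result data row_index dimensions threshold) := by unfold Pre_get_lab_under_result; infer_instance

def pvWitness_get_lab_under_result : List (List Int) × Int × List String × Int :=
  ([[1, 7]], 0, ["a", "b"], 5)

def Spec_get_lab_under_result (data : List (List Int)) (row_index : Int) (dimensions : List String) (threshold : Int) (out : String) : Prop := out = get_lab_under_result_alt data row_index dimensions threshold
instance (data : List (List Int)) (row_index : Int) (dimensions : List String) (threshold : Int) (out : String) : Decidable (Spec_get_lab_under_result data row_index dimensions threshold out) := by unfold Spec_get_lab_under_result; infer_instance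

-- ===== CLAIM (what is proved, stated in full; the proofs are below) =====
def Claim_equal_get_lab_under_result : Prop := ∀ (data : List (List Int)) (row_index : Int) (dimensions : List String) (threshold : Int), Dom_get_lab_under_result data row_index dimensions threshold → Pre_get_lab_under_result data row_index dimensions threshold → Spec_get_lab_under_result data row_index dimensions threshold (get_lab_under_result data row_index dimensions threshold)

-- ===== LEMMAS AND PROOFS =====
-- join on a cons: peel one element off.
lemma join_singleton' (sep a : String) : PySem.Str.join sep [a] = a := by
  simp [PySem.Str.join, PySem.Chars.join_singleton]

lemma join_cons (sep a b : String) (t : List String) :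
    PySem.Str.join sep (a :: b :: t) = a ++ sep ++ PySem.Str.join sep (b :: t) := by
  simp [PySem.Str.join, PySem.Chars.join_cons_cons, String.append_assoc]

-- B's recursion computes exactly the ", "-join of the fused filter-and-format list
-- over the enumerated suffix (none when the list is empty).
lemma goB_eq_join (dims : List String) (th : Int) :
    ∀ (l : List Int) (i : Int),
      goB dims th l i =
        (match (PySem.List.enumerate l i).filterMap
            (fun p => if p.2 < th then
                some ("{" ++ (PySem.List.pyGet? dims p.1).getD "" ++ "} is {" ++
                      PySem.Int.toStr p.2 ++ "}")
              else none) with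
          | [] => none
          | xs => some (PySem.Str.join ", " xs))
  | [], i => by simp [goB, PySem.List.enumerate_nil]
  | v :: rest, i => by
    have ih := goB_eq_join dims th rest (i + 1)
    rw [goB, PySem.List.enumerate_cons, List.filterMap_cons, ih]
    by_cases hv : v < th
    · simp only [if_pos hv]
      cases hxs : (PySem.List.enumerate rest (i + 1)).filterMap
          (fun p => if p.2 < th then
              some ("{" ++ (PySem.List.pyGet? dims p.1).getD "" ++ "} is {" ++
                    PySem.Int.toStr p.2 ++ "}")
            else none) with
      | nil => simp [join_singleton']
      | cons y ys => simp [join_cons]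
    · simp only [if_neg hv]

-- Mapping A's formatter over the filtered indices equals the fused filter-and-format,
-- provided each enumerated pair really is (index, row[index]).
lemma map_fmt_eq_filterMap (dims : List String) (row : List Int) (th : Int) :
    ∀ (l : List (Int × Int)), (∀ p ∈ l, PySem.List.pyGet? row p.1 = some p.2) →
    (l.filterMap (fun p => if p.2 < th then some p.1 else none)).map
      (fun idx => "{" ++ (PySem.List.pyGet? dims idx).getD "" ++ "} is {" ++
        PySem.Int.toStr ((PySem.List.pyGet? row idx).getD 0) ++ "}")
    = l.filterMap (fun p => if p.2 < th then
        some ("{" ++ (PySem.List.pyGet? dims p.1).getD "" ++ "} is {" ++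
              PySem.Int.toStr p.2 ++ "}") else none)
  | [], _ => rfl
  | p :: l, h => by
    have hp := h p (List.mem_cons_self ..)
    have ih := map_fmt_eq_filterMap dims row th l (fun q hq => h q (List.mem_cons_of_mem _ hq))
    by_cases hlt : p.2 < th
    · simp only [List.filterMap_cons, if_pos hlt, List.map_cons, ih, hp, Option.getD_some]
    · simp only [List.filterMap_cons, if_neg hlt, ih]

lemma enumerate_pyGet? (row : List Int) :
    ∀ p ∈ PySem.List.enumerate row, PySem.List.pyGet? row p.1 = some p.2 := by
  intro p hp
  rcases (PySem.List.mem_enumerate_iff _ _ _).1 hp with ⟨k, hk, rfl⟩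
  simp [PySem.List.pyGet?_natCast, List.getElem?_eq_getElem hk]

-- ===== VERDICT (by name: the statement is the Claim_ definition above) =====
theorem get_lab_under_result_spec : Claim_equal_get_lab_under_result := by
  intro data row_index dimensions threshold _ hpre
  obtain ⟨hnn, hlt, -⟩ := hpre
  unfold Spec_get_lab_under_result get_lab_under_result get_lab_under_result_alt get_index_less_than
  have hguard : ¬ (row_index < 0 ∨ (data.length : Int) ≤ row_index) := by omega
  simp only [if_neg hguard]
  set row := (PySem.List.pyGet? data row_index).getD [] with hrow
  have hkey := map_fmt_eq_filterMap dimensions row threshold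
    (PySem.List.enumerate row) (enumerate_pyGet? row)
  rw [goB_eq_join]
  set indices := (PySem.List.enumerate row).filterMap
    (fun p => if p.2 < threshold then some p.1 else none) with hind
  by_cases hemp : indices.isEmpty
  · have hnil : indices = [] := by simpa [List.isEmpty_iff] using hemp
    have hfnil : (PySem.List.enumerate row 0).filterMap
        (fun p => if p.2 < threshold then
            some ("{" ++ (PySem.List.pyGet? dimensions p.1).getD "" ++ "} is {" ++
                  PySem.Int.toStr p.2 ++ "}")
          else none) = [] := by
      rw [← hkey, hnil]; rfl
    simp [hemp, hfnil]
  · have hne : indices ≠ [] := by simpa [List.isEmpty_iff] using hemp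
    have hfne : (PySem.List.enumerate row 0).filterMap
        (fun p => if p.2 < threshold then
            some ("{" ++ (PySem.List.pyGet? dimensions p.1).getD "" ++ "} is {" ++
                  PySem.Int.toStr p.2 ++ "}")
          else none) ≠ [] := by
      rw [← hkey]; simpa using hne
    simp only [hemp, Bool.false_eq_true, if_false]
    cases hxs : (PySem.List.enumerate row 0).filterMap
        (fun p => if p.2 < threshold then
            some ("{" ++ (PySem.List.pyGet? dimensions p.1).getD "" ++ "} is {" ++
                  PySem.Int.toStr p.2 ++ "}")
          else none) with
    | nil => exact absurd hxs hfne
    | cons y ys => rw [hkey, hxs]
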